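-- pv_equiv track=rewrite | github.com/Rigel0718/transcript-insight | parser/ocrparser.py | _split_by_y_bounds
-- ===== SOURCE A (Python) =====
-- def _split_by_y_bounds(lines, y_top, y_bottom):
--     # lines [(text, x, y)... ]
--     # -3을 하는 이유는 llm이 간혹가다가 의미에 포함되는 것을 경계로 삼아서 정보 손실이 되는 경우가 있기 때문에
--     y_top = y_top-3
--     y_bottom = y_bottom-3
--     return {
--         "top": [r[0] for r in lines if r[2] < y_top],
--         "grade": [r[0] for r in lines if y_top <= r[2] < y_bottom],
--         "bottom": [r[0] for r in lines if r[2] >= y_bottom],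
--     }
-- ===== SOURCE B (Python) =====
-- def _split_by_y_bounds(lines, y_top, y_bottom):
--     yt = y_top - 3
--     yb = y_bottom - 3
--     top, grade, bottom = [], [], []
--     for text, _x, y in lines:
--         if y < yt:
--             top.append(text)
--         if yt <= y < yb:
--             grade.append(text)
--         if y >= yb:
--             bottom.append(text)
--     return {"top": top, "grade": grade, "bottom": bottom}
-- ===== Notes on version B (the rewrite author's own statement) =====
-- stated objective: alternative
-- what changed: Replaces three separate full-list comprehension scans with one single pass over the lines that tests each line's y against the three bands and appends its text to the matching list(s).
import Mathlib
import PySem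

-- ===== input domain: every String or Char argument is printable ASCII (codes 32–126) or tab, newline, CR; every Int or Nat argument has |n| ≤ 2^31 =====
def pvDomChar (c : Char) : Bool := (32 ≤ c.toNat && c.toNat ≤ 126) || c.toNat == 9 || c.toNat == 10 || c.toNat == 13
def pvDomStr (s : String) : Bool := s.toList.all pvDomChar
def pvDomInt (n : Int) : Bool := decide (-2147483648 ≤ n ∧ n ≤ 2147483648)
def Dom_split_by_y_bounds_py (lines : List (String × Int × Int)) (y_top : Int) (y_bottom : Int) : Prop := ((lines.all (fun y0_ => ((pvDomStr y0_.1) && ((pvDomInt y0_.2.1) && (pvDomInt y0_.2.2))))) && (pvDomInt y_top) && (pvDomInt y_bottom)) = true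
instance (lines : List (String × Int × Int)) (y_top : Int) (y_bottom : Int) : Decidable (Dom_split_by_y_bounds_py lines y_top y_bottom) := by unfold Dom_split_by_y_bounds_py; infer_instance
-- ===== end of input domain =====

-- B replaces A's three full-list comprehension scans with one single-pass loop that
-- tests each line's y against the three bands and appends to the matching lists.


-- ===== PORT A =====
def split_by_y_bounds_py (lines : List (String × Int × Int)) (y_top : Int) (y_bottom : Int) : List (String × List String) :=
  let y_top := y_top - 3
  let y_bottom := y_bottom - 3
  [("top", (lines.filter (fun r => r.2.2 < y_top)).map (fun r => r.1)),
   ("grade", (lines.filter (fun r => y_top ≤ r.2.2 ∧ r.2.2 < y_bottom)).map (fun r => r.1)),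
   ("bottom", (lines.filter (fun r => r.2.2 ≥ y_bottom)).map (fun r => r.1))]

-- ===== PORT B =====
-- one step of B's single-pass loop: test the line's y against the three bands and
-- append its text to each matching list (the three ifs are independent, as in Source B)
def splitStepB (yt yb : Int) (acc : List String × List String × List String)
    (r : String × Int × Int) : List String × List String × List String :=
  let acc := if r.2.2 < yt then (acc.1 ++ [r.1], acc.2.1, acc.2.2) else acc
  let acc := if yt ≤ r.2.2 ∧ r.2.2 < yb then (acc.1, acc.2.1 ++ [r.1], acc.2.2) else acc
  if r.2.2 ≥ yb then (acc.1, acc.2.1, acc.2.2 ++ [r.1]) else acc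

def split_by_y_bounds_py_alt (lines : List (String × Int × Int)) (y_top : Int) (y_bottom : Int) : List (String × List String) :=
  let yt := y_top - 3
  let yb := y_bottom - 3
  let acc := lines.foldl (splitStepB yt yb) ([], [], [])
  [("top", acc.1), ("grade", acc.2.1), ("bottom", acc.2.2)]

-- ===== PRECONDITION & SPEC =====
def Spec_split_by_y_bounds_py (lines : List (String × Int × Int)) (y_top : Int) (y_bottom : Int) (out : List (String × List String)) : Prop := out = split_by_y_bounds_py_alt lines y_top y_bottom
instance (lines : List (String × Int × Int)) (y_top : Int) (y_bottom : Int) (out : List (String × List String)) : Decidable (Spec_split_by_y_bounds_py lines y_top y_bottom out) := by unfold Spec_split_by_y_bounds_py; infer_instance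

-- ===== CLAIM (what is proved, stated in full; the proofs are below) =====
def Claim_equal_split_by_y_bounds_py : Prop := ∀ (lines : List (String × Int × Int)) (y_top : Int) (y_bottom : Int), Dom_split_by_y_bounds_py lines y_top y_bottom → Spec_split_by_y_bounds_py lines y_top y_bottom (split_by_y_bounds_py lines y_top y_bottom)

-- ===== LEMMAS AND PROOFS =====

-- loop invariant: B's fold over `lines`, started from accumulators (t, g, b),
-- appends exactly A's three filtered projections.
theorem splitFold_eq (yt yb : Int) (lines : List (String × Int × Int))
    (t g b : List String) :
    lines.foldl (splitStepB yt yb) (t, g, b) =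
      (t ++ (lines.filter (fun r => r.2.2 < yt)).map (fun r => r.1),
       g ++ (lines.filter (fun r => yt ≤ r.2.2 ∧ r.2.2 < yb)).map (fun r => r.1),
       b ++ (lines.filter (fun r => r.2.2 ≥ yb)).map (fun r => r.1)) := by
  induction lines generalizing t g b with
  | nil => simp
  | cons r rest ih =>
    simp only [List.foldl_cons, List.filter_cons, splitStepB]
    by_cases h1 : r.2.2 < yt <;> by_cases h2 : yt ≤ r.2.2 ∧ r.2.2 < yb <;>
      by_cases h3 : r.2.2 ≥ yb <;>
      simp [h1, h2, h3, ih]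

-- ===== VERDICT (by name: the statement is the Claim_ definition above) =====
theorem split_by_y_bounds_py_spec : Claim_equal_split_by_y_bounds_py := by
  intro lines y_top y_bottom _
  unfold Spec_split_by_y_bounds_py split_by_y_bounds_py split_by_y_bounds_py_alt
  dsimp only
  rw [splitFold_eq (y_top - 3) (y_bottom - 3) lines [] [] []]
  simp
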